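-- pv_equiv track=rewrite | github.com/Zahin52/enigma_assignment | enigma.py | getReflected
-- ===== SOURCE A (Python) =====
-- reflector = ['a', 'b', 'c', 'd', 'e', 'f', 'g', 'd', 'i', 'j', 'k', 'g', 'm', 'k', 'm', 'i', 'e', 'b', 'f', 't', 'c', 'v', 'v', 'j', 'a', 't']
--
-- def getReflected(index):
--     i=0
--     while i<26:
--         if i==index:
--             i+=1
--             continue
--         if reflector[i]==reflector[index]:
--             break
--         i+=1
--     return i
-- ===== SOURCE B (Python) =====
-- reflector = ['a', 'b', 'c', 'd', 'e', 'f', 'g', 'd', 'i', 'j', 'k', 'g', 'm', 'k', 'm', 'i', 'e', 'b', 'f', 't', 'c', 'v', 'v', 'j', 'a', 't']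
--
-- # One-pass pairing tables built at module load: first and second occurrence index of each letter.
-- _first = {}
-- _second = {}
-- for _i, _c in enumerate(reflector):
--     if _c in _first:
--         _second[_c] = _i
--     else:
--         _first[_c] = _i
--
-- def getReflected(index):
--     c = reflector[index]
--     return _second[c] if _first[c] == index else _first[c]
-- ===== Notes on version B (the rewrite author's own statement) =====
-- stated objective: simpler
-- what changed: Replaces the call-time linear scan over the reflector with pairing tables (first/second occurrence of each letter) built once at module load; getReflected becomes a constant-time lookup choosing the partner occurrence.
import Mathlib
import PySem

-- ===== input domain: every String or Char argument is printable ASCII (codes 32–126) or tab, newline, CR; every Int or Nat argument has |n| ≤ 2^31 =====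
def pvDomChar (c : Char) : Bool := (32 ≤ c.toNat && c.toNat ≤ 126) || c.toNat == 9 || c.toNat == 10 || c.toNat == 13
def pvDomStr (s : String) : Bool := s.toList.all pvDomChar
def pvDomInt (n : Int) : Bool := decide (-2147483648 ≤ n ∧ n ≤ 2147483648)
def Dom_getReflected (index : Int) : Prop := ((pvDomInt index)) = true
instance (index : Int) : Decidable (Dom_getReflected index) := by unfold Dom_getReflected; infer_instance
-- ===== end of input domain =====

-- B builds first/second-occurrence tables once and answers with a lookup instead of scanning (objective: simpler per-call logic).
-- ===== PORT A =====
def reflector : List Char := ['a', 'b', 'c', 'd', 'e', 'f', 'g', 'd', 'i', 'j', 'k', 'g', 'm', 'k', 'm', 'i', 'e', 'b', 'f', 't', 'c', 'v', 'v', 'j', 'a', 't']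

-- fuel-based transcription of A's while loop (26 iterations suffice since i starts at 0 and i < 26 guards the loop)
def pvGoA (index : Int) : Nat → Nat → Int
  | 0, i => (i : Int)
  | fuel + 1, i =>
    if i < 26 then
      if (i : Int) = index then pvGoA index fuel (i + 1)
      else if PySem.List.pyGet? reflector (i : Int) = PySem.List.pyGet? reflector index then (i : Int)
      else pvGoA index fuel (i + 1)
    else (i : Int)

def getReflected (index : Int) : Int := pvGoA index 26 0

-- ===== PORT B =====
-- module-load pass: first and second occurrence index of each letter
def pvTables : PySem.Dict Char Int × PySem.Dict Char Int :=
  (PySem.List.enumerate reflector).foldl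
    (fun fs ic =>
      if (fs.1.get? ic.2).isSome then (fs.1, fs.2.insert ic.2 ic.1)
      else (fs.1.insert ic.2 ic.1, fs.2))
    (PySem.Dict.empty, PySem.Dict.empty)

def getReflected_alt (index : Int) : Int :=
  match PySem.List.pyGet? reflector index with
  | some c =>
      if pvTables.1.getD c 0 = index then pvTables.2.getD c 0 else pvTables.1.getD c 0
  | none => 0   -- unreachable under Pre_ (Python raises IndexError here)

-- ===== PRECONDITION & SPEC =====
-- Pre_ excludes exactly the indices where reflector[index] raises IndexError in both programs.
def Pre_getReflected (index : Int) : Prop := -26 ≤ index ∧ index < 26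
instance (index : Int) : Decidable (Pre_getReflected index) := by unfold Pre_getReflected; infer_instance
def pvWitness_getReflected : Int := 3
def Spec_getReflected (index : Int) (out : Int) : Prop := out = getReflected_alt index
instance (index : Int) (out : Int) : Decidable (Spec_getReflected index out) := by unfold Spec_getReflected; infer_instance

-- ===== CLAIM (what is proved, stated in full; the proofs are below) =====
def Claim_equal_getReflected : Prop := ∀ (index : Int), Dom_getReflected index → Pre_getReflected index → Spec_getReflected index (getReflected index)

-- ===== LEMMAS AND PROOFS =====

-- ===== VERDICT (by name: the statement is the Claim_ definition above) =====
set_option maxRecDepth 4000 in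
theorem getReflected_spec : Claim_equal_getReflected := by
  intro index _ hpre
  obtain ⟨h1, h2⟩ := hpre
  unfold Spec_getReflected
  interval_cases index <;> decide
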